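-- pv_equiv track=rewrite | github.com/matthew-tendler/therapist-matcher | app.py | build_schedule_label
-- ===== SOURCE A (Python) =====
-- WEEKDAYS = ["Mon", "Tue", "Wed", "Thu", "Fri"]
--
-- def get_therapist_schedule(row: dict) -> dict:
--     """
--     Returns a dict mapping each workday to its modality.
--     Example: {"Mon": "In-Person", "Tue": "Telehealth", "Wed": "In-Person", ...}
--     - In-Person: in_person_days (or all weekdays if blank) -> In-Person
--     - Telehealth: all weekdays -> Telehealth
--     - Hybrid: in_person_days -> In-Person, remaining weekdays -> Telehealth
--     """
--     modality = row.get("modality", "Telehealth")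
--     raw = row.get("in_person_days", "") or ""
--     in_person_days = [d.strip() for d in raw.split(",") if d.strip() in WEEKDAYS]
--
--     schedule = {}
--     if modality == "In-Person":
--         work_days = in_person_days if in_person_days else WEEKDAYS
--         for d in work_days:
--             schedule[d] = "In-Person"
--     elif modality == "Telehealth":
--         for d in WEEKDAYS:
--             schedule[d] = "Telehealth"
--     elif modality == "Hybrid":
--         for d in WEEKDAYS:
--             schedule[d] = "In-Person" if d in in_person_days else "Telehealth"
--     return schedule
--
-- def build_schedule_label(row: dict) -> str:
--     """
--     Returns a clear, human-readable schedule string.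
--
--     In-Person:  "🏢 In-Person: Mon–Fri (Commack)"
--     Telehealth: "💻 Telehealth: Mon–Fri"
--     Hybrid:     "🏢 In-Person: Mon, Wed, Fri (Commack)  |  💻 Telehealth: Tue, Thu"
--     """
--     modality = row.get("modality", "Telehealth")
--     location = row.get("location", "")
--     schedule = get_therapist_schedule(row)
--
--     ip_days = [d for d in WEEKDAYS if schedule.get(d) == "In-Person"]
--     th_days = [d for d in WEEKDAYS if schedule.get(d) == "Telehealth"]
--
--     def fmt_days(days):
--         if days == WEEKDAYS:
--             return "Mon–Fri"
--         return ", ".join(days)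
--
--     if modality == "In-Person":
--         loc = f" ({location})" if location else ""
--         return f"🏢 In-Person: {fmt_days(ip_days)}{loc}"
--     elif modality == "Telehealth":
--         return f"💻 Telehealth: {fmt_days(th_days)}"
--     elif modality == "Hybrid":
--         loc = f" ({location})" if location else ""
--         parts = []
--         if ip_days:
--             parts.append(f"🏢 In-Person: {fmt_days(ip_days)}{loc}")
--         if th_days:
--             parts.append(f"💻 Telehealth: {fmt_days(th_days)}")
--         return "  |  ".join(parts)
--     return modality
-- ===== SOURCE B (Python) =====
-- WEEKDAYS = ["Mon", "Tue", "Wed", "Thu", "Fri"]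
--
-- def build_schedule_label(row):
--     modality = row.get("modality", "Telehealth")
--     if modality == "Telehealth":
--         return "💻 Telehealth: Mon–Fri"
--     raw = row.get("in_person_days", "") or ""
--     parsed = [d.strip() for d in raw.split(",") if d.strip() in WEEKDAYS]
--     location = row.get("location", "")
--     loc = f" ({location})" if location else ""
--
--     def fmt(days):
--         return "Mon–Fri" if days == WEEKDAYS else ", ".join(days)
--
--     if modality == "In-Person":
--         ip = [d for d in WEEKDAYS if d in parsed] or WEEKDAYS
--         return f"🏢 In-Person: {fmt(ip)}{loc}"
--     if modality == "Hybrid":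
--         parts = []
--         ip = [d for d in WEEKDAYS if d in parsed]
--         th = [d for d in WEEKDAYS if d not in parsed]
--         if ip:
--             parts.append(f"🏢 In-Person: {fmt(ip)}{loc}")
--         if th:
--             parts.append(f"💻 Telehealth: {fmt(th)}")
--         return "  |  ".join(parts)
--     return modality
-- ===== Notes on version B (the rewrite author's own statement) =====
-- stated objective: simpler
-- what changed: B drops the intermediate day-to-modality dict entirely: it computes the In-Person/Telehealth day lists directly per modality from the parsed in_person_days (and returns the Telehealth label as a constant), instead of building a schedule dict with a loop and then filtering the weekdays through dict lookups twice.
import Mathlib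
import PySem

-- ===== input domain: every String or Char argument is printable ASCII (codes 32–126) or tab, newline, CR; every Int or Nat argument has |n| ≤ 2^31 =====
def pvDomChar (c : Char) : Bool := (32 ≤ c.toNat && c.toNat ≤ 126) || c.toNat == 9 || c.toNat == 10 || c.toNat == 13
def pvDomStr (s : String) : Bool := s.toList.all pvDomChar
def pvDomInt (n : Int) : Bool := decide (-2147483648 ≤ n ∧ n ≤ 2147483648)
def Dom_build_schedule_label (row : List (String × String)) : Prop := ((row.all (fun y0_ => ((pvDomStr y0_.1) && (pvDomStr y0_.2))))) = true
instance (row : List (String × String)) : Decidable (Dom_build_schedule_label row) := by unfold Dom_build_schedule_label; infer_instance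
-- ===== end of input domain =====

-- B inlines the per-modality day lists instead of building a day→modality dict and filtering it twice (objective: simpler).

-- row.get(k, dflt) on the association-list dict (first match, Python dict keys are unique)
def pvRowGet (row : List (String × String)) (k dflt : String) : String :=
  (((row.find? (fun p => p.1 == k)).map (fun p => p.2)).getD dflt)

def pvWeekdays : List String := ["Mon", "Tue", "Wed", "Thu", "Fri"]

-- [d.strip() for d in raw.split(",") if d.strip() in WEEKDAYS]; sep "," ≠ "" so split? is always some
def pvParseDays (raw : String) : List String :=
  (((PySem.Str.split? raw ",").getD []).filter
      (fun d => pvWeekdays.contains (PySem.Str.strip d))).map PySem.Str.strip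

-- ===== PORT A =====
def get_therapist_schedule (row : List (String × String)) : PySem.Dict String String :=
  let modality := pvRowGet row "modality" "Telehealth"
  let raw0 := pvRowGet row "in_person_days" ""
  let raw := if raw0 = "" then "" else raw0   -- `raw or ""` (values are strings; falsy = "")
  let in_person_days := pvParseDays raw
  let schedule : PySem.Dict String String := PySem.Dict.empty
  if modality = "In-Person" then
    let work_days := if in_person_days ≠ [] then in_person_days else pvWeekdays
    work_days.foldl (fun s d => s.insert d "In-Person") schedule
  else if modality = "Telehealth" then
    pvWeekdays.foldl (fun s d => s.insert d "Telehealth") schedule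
  else if modality = "Hybrid" then
    pvWeekdays.foldl
      (fun s d => s.insert d (if in_person_days.contains d then "In-Person" else "Telehealth"))
      schedule
  else schedule

def pvFmtDays (days : List String) : String :=
  if days = pvWeekdays then "Mon–Fri" else PySem.Str.join ", " days

def build_schedule_label (row : List (String × String)) : String :=
  let modality := pvRowGet row "modality" "Telehealth"
  let location := pvRowGet row "location" ""
  let schedule := get_therapist_schedule row
  let ip_days := pvWeekdays.filter (fun d => schedule.get? d == some "In-Person")
  let th_days := pvWeekdays.filter (fun d => schedule.get? d == some "Telehealth")
  if modality = "In-Person" then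
    let loc := if location ≠ "" then " (" ++ location ++ ")" else ""
    "🏢 In-Person: " ++ pvFmtDays ip_days ++ loc
  else if modality = "Telehealth" then
    "💻 Telehealth: " ++ pvFmtDays th_days
  else if modality = "Hybrid" then
    let loc := if location ≠ "" then " (" ++ location ++ ")" else ""
    let parts : List String :=
      (if ip_days ≠ [] then ["🏢 In-Person: " ++ pvFmtDays ip_days ++ loc] else []) ++
      (if th_days ≠ [] then ["💻 Telehealth: " ++ pvFmtDays th_days] else [])
    PySem.Str.join "  |  " parts
  else modality

-- ===== PORT B =====
def build_schedule_label_alt (row : List (String × String)) : String :=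
  let modality := pvRowGet row "modality" "Telehealth"
  if modality = "Telehealth" then "💻 Telehealth: Mon–Fri"
  else
    let raw0 := pvRowGet row "in_person_days" ""
    let raw := if raw0 = "" then "" else raw0
    let parsed := pvParseDays raw
    let location := pvRowGet row "location" ""
    let loc := if location ≠ "" then " (" ++ location ++ ")" else ""
    if modality = "In-Person" then
      let ip0 := pvWeekdays.filter (fun d => parsed.contains d)
      let ip := if ip0 ≠ [] then ip0 else pvWeekdays
      "🏢 In-Person: " ++ pvFmtDays ip ++ loc
    else if modality = "Hybrid" then
      let ip := pvWeekdays.filter (fun d => parsed.contains d)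
      let th := pvWeekdays.filter (fun d => !parsed.contains d)
      let parts : List String :=
        (if ip ≠ [] then ["🏢 In-Person: " ++ pvFmtDays ip ++ loc] else []) ++
        (if th ≠ [] then ["💻 Telehealth: " ++ pvFmtDays th] else [])
      PySem.Str.join "  |  " parts
    else modality

-- ===== PRECONDITION & SPEC =====
def Spec_build_schedule_label (row : List (String × String)) (out : String) : Prop := out = build_schedule_label_alt row
instance (row : List (String × String)) (out : String) : Decidable (Spec_build_schedule_label row out) := by unfold Spec_build_schedule_label; infer_instance

-- ===== CLAIM (what is proved, stated in full; the proofs are below) =====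
def Claim_equal_build_schedule_label : Prop := ∀ (row : List (String × String)), Dom_build_schedule_label row → Spec_build_schedule_label row (build_schedule_label row)

-- ===== LEMMAS AND PROOFS =====

-- constant-value insertion loop: lookup is membership
lemma get?_foldl_insert_const (xs : List String) (d : PySem.Dict String String)
    (v : String) (k : String) :
    (xs.foldl (fun s x => s.insert x v) d).get? k
      = if xs.contains k then some v else d.get? k := by
  induction xs generalizing d with
  | nil => simp
  | cons x xs ih =>
    simp only [List.foldl_cons, ih, List.contains_cons]
    rcases eq_or_ne k x with h | h
    · subst h
      simp
    · by_cases hm : xs.contains k <;> simp [PySem.Dict.get?_insert, h]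

lemma parse_subset (raw d : String) (h : d ∈ pvParseDays raw) : pvWeekdays.contains d := by
  simp only [pvParseDays, List.mem_map, List.mem_filter] at h
  obtain ⟨c, ⟨_, hc⟩, rfl⟩ := h
  exact hc

lemma filter_contains_ne_nil (p : List String) (hp : p ≠ [])
    (hsub : ∀ d ∈ p, pvWeekdays.contains d) :
    pvWeekdays.filter (fun d => p.contains d) ≠ [] := by
  obtain ⟨x, xs, rfl⟩ := List.exists_cons_of_ne_nil hp
  have hx : x ∈ pvWeekdays := by simpa using hsub x (by simp)
  intro hnil
  have hxf : x ∈ pvWeekdays.filter (fun d => (x :: xs).contains d) :=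
    List.mem_filter.mpr ⟨hx, by simp⟩
  rw [hnil] at hxf
  exact (List.not_mem_nil) hxf

-- ===== VERDICT (by name: the statement is the Claim_ definition above) =====
set_option maxHeartbeats 1000000 in
theorem build_schedule_label_spec : Claim_equal_build_schedule_label := by
  intro row _
  show build_schedule_label row = build_schedule_label_alt row
  unfold build_schedule_label build_schedule_label_alt get_therapist_schedule
  simp only []
  set modality := pvRowGet row "modality" "Telehealth" with hmod
  set location := pvRowGet row "location" "" with hloc
  set raw0 := pvRowGet row "in_person_days" "" with hraw0
  set parsed := pvParseDays (if raw0 = "" then "" else raw0) with hparsed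
  have hsub : ∀ d ∈ parsed, pvWeekdays.contains d = true := fun d hd => parse_subset _ d hd
  by_cases hIP : modality = "In-Person"
  · -- In-Person branch
    simp only [hIP, reduceIte]
    by_cases hne : parsed ≠ []
    · simp only [if_pos hne, get?_foldl_insert_const]
      have hip : pvWeekdays.filter
            (fun d => ((if parsed.contains d then some "In-Person" else PySem.Dict.empty.get? d) == some "In-Person"))
          = pvWeekdays.filter (fun d => parsed.contains d) := by
        apply List.filter_congr
        intro d _
        by_cases h : d ∈ parsed <;> simp [h, PySem.Dict.get?_empty]
      rw [hip, if_pos (filter_contains_ne_nil parsed hne hsub)]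
      simp
    · simp only [if_neg hne, get?_foldl_insert_const]
      rw [not_ne_iff] at hne
      have hip0 : pvWeekdays.filter (fun d => parsed.contains d) = [] := by simp [hne]
      have hipA : pvWeekdays.filter
            (fun d => ((if pvWeekdays.contains d then some "In-Person" else PySem.Dict.empty.get? d) == some "In-Person"))
          = pvWeekdays := by decide
      rw [hip0, hipA]
      simp
  · by_cases hTH : modality = "Telehealth"
    · -- Telehealth branch
      simp only [hTH, reduceIte, if_neg (by decide : ¬("Telehealth" = "In-Person")),
        get?_foldl_insert_const]
      have hthA : pvWeekdays.filter
            (fun d => ((if pvWeekdays.contains d then some "Telehealth" else PySem.Dict.empty.get? d) == some "Telehealth"))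
          = pvWeekdays := by decide
      rw [hthA]
      rfl
    · by_cases hHY : modality = "Hybrid"
      · -- Hybrid branch
        simp only [hHY, reduceIte, if_neg (by decide : ¬("Hybrid" = "In-Person")),
          if_neg (by decide : ¬("Hybrid" = "Telehealth"))]
        have hget : ∀ d ∈ pvWeekdays, (pvWeekdays.foldl
            (fun s d => s.insert d (if parsed.contains d then "In-Person" else "Telehealth"))
            PySem.Dict.empty).get? d
            = some (if parsed.contains d then "In-Person" else "Telehealth") := by
          intro d hd
          have hd5 : d = "Mon" ∨ d = "Tue" ∨ d = "Wed" ∨ d = "Thu" ∨ d = "Fri" := by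
            simpa [pvWeekdays] using hd
          rcases hd5 with rfl | rfl | rfl | rfl | rfl <;>
            simp [pvWeekdays, List.foldl, PySem.Dict.get?_insert]
        have hip : pvWeekdays.filter (fun d => ((pvWeekdays.foldl
            (fun s d => s.insert d (if parsed.contains d then "In-Person" else "Telehealth"))
            PySem.Dict.empty).get? d == some "In-Person"))
            = pvWeekdays.filter (fun d => parsed.contains d) := by
          apply List.filter_congr
          intro d hd
          rw [hget d hd]
          by_cases h : d ∈ parsed <;> simp [h]
        have hth : pvWeekdays.filter (fun d => ((pvWeekdays.foldl
            (fun s d => s.insert d (if parsed.contains d then "In-Person" else "Telehealth"))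
            PySem.Dict.empty).get? d == some "Telehealth"))
            = pvWeekdays.filter (fun d => !parsed.contains d) := by
          apply List.filter_congr
          intro d hd
          rw [hget d hd]
          by_cases h : d ∈ parsed <;> simp [h]
        rw [hip, hth]
      · simp [hIP, hTH, hHY]
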